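-- pv_equiv track=rewrite | github.com/haolunc/ARC-RL | reference_solutions/solutions/973e499e.py | transform
-- ===== SOURCE A (Python) =====
-- def transform(grid):
--
--     N = len(grid)
--     M = N * N
--
--     out = [[0 for _ in range(M)] for _ in range(M)]
--
--     for i in range(N):
--         for j in range(N):
--             v = grid[i][j]
--             for a in range(N):
--                 for b in range(N):
--                     if grid[a][b] == v:
--                         out[i * N + a][j * N + b] = v
--     return out
-- ===== SOURCE B (Python) =====
-- def transform(grid):
--     # Group positions by value, then scatter each group onto the output:
--     # only value-matched position pairs are visited.
--     N = len(grid)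
--     M = N * N
--     groups = {}
--     for i in range(N):
--         for j in range(N):
--             groups.setdefault(grid[i][j], []).append((i, j))
--     out = [[0] * M for _ in range(M)]
--     for v, pos in groups.items():
--         for (i, j) in pos:
--             for (a, b) in pos:
--                 out[i * N + a][j * N + b] = v
--     return out
-- ===== Notes on version B (the rewrite author's own statement) =====
-- stated objective: alternative
-- what changed: B first builds a dict mapping each grid value to the list of its positions in one N^2 pass, then for each group scatters v into out[i*N+a][j*N+b] over pairs of positions of that group, so the inner scan-with-branch of A's quadruple loop disappears and only value-matched position pairs are visited.
import Mathlib
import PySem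

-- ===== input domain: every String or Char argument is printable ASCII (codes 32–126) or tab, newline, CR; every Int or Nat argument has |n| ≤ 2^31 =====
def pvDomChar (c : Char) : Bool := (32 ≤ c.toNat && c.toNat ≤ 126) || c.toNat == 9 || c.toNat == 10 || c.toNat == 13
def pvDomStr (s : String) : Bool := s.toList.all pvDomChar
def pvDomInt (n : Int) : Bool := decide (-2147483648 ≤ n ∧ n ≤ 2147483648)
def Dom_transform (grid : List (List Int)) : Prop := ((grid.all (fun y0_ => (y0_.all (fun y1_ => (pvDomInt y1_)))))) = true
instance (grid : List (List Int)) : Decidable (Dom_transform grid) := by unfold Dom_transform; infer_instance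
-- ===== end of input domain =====

-- B groups equal-valued positions in a dict first and scatters each group onto the
-- output over pairs of its positions, instead of A's O(N^4) scan-with-branch
-- (objective: alternative decomposition; visits only value-matched pairs).


-- ===== PORT A =====
-- grid[a][b] for nonnegative in-range indices (guaranteed by Pre_transform)
def pvGet2 (g : List (List Int)) (a b : Nat) : Int := (g.getD a []).getD b 0

-- out[r][c] = v (in-range assignment)
def pvUpd2 (m : List (List Int)) (r c : Nat) (v : Int) : List (List Int) :=
  m.modify r (fun row => row.set c v)

def transform (grid : List (List Int)) : List (List Int) :=
  let N := grid.length
  let M := N * N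
  let out0 := List.replicate M (List.replicate M (0 : Int))
  (List.range N).foldl (fun out i =>
    (List.range N).foldl (fun out j =>
      (List.range N).foldl (fun out a =>
        (List.range N).foldl (fun out b =>
          if pvGet2 grid a b = pvGet2 grid i j then
            pvUpd2 out (i * N + a) (j * N + b) (pvGet2 grid i j)
          else out)
          out) out) out) out0

-- ===== PORT B =====
-- groups.setdefault(grid[i][j], []).append((i, j))  ==  modify with default [] appending
def transform_alt (grid : List (List Int)) : List (List Int) :=
  let N := grid.length
  let M := N * N
  let groups : PySem.Dict Int (List (Nat × Nat)) :=
    (List.range N).foldl (fun d i =>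
      (List.range N).foldl (fun d j =>
        d.modify (pvGet2 grid i j) [] (· ++ [(i, j)])) d) PySem.Dict.empty
  let out0 := List.replicate M (List.replicate M (0 : Int))
  groups.items.foldl (fun out vp =>
    vp.2.foldl (fun out ij =>
      vp.2.foldl (fun out ab =>
        pvUpd2 out (ij.1 * N + ab.1) (ij.2 * N + ab.2) vp.1) out) out) out0

-- ===== PRECONDITION & SPEC =====
-- Pre_ excludes exactly the inputs where A raises IndexError: a row shorter than len(grid).
def Pre_transform (grid : List (List Int)) : Prop :=
  ∀ row ∈ grid, grid.length ≤ row.length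

instance (grid : List (List Int)) : Decidable (Pre_transform grid) := by
  unfold Pre_transform; infer_instance

def pvWitness_transform : List (List Int) := [[1, 2], [2, 1]]

def Spec_transform (grid : List (List Int)) (out : List (List Int)) : Prop := out = transform_alt grid
instance (grid : List (List Int)) (out : List (List Int)) : Decidable (Spec_transform grid out) := by unfold Spec_transform; infer_instance

-- ===== CLAIM (what is proved, stated in full; the proofs are below) =====
def Claim_equal_transform : Prop := ∀ (grid : List (List Int)), Dom_transform grid → Pre_transform grid → Spec_transform grid (transform grid)

-- ===== LEMMAS AND PROOFS =====

-- an M × M matrix, seen through total getD access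
def pvShape (M : Nat) (m : List (List Int)) : Prop :=
  m.length = M ∧ ∀ r, r < M → (m.getD r []).length = M

lemma blk_lt {i a N : Nat} (hi : i < N) (ha : a < N) : i * N + a < N * N := by
  calc i * N + a < i * N + N := by omega
    _ = (i + 1) * N := by ring
    _ ≤ N * N := Nat.mul_le_mul_right N hi

lemma blk_div {i a N : Nat} (ha : a < N) : (i * N + a) / N = i := by
  have hN : 0 < N := by omega
  rw [Nat.add_comm, Nat.add_mul_div_right _ _ hN, Nat.div_eq_of_lt ha]; omega

lemma blk_mod {i a N : Nat} (ha : a < N) : (i * N + a) % N = a := by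
  rw [Nat.add_comm, Nat.add_mul_mod_self_right, Nat.mod_eq_of_lt ha]

lemma pvShape_upd2 {M : Nat} {m : List (List Int)} (h : pvShape M m) (r c : Nat) (v : Int) :
    pvShape M (pvUpd2 m r c v) := by
  obtain ⟨h1, h2⟩ := h
  refine ⟨by simp [pvUpd2, h1], fun r' hr' => ?_⟩
  simp only [pvUpd2, List.getD_eq_getElem?_getD, List.getElem?_modify]
  have := h2 r' hr'
  rw [List.getD_eq_getElem?_getD] at this
  cases hm : m[r']? with
  | none => rw [hm] at this; simp at this; simp [this]
  | some row =>
    rw [hm] at this; simp at this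
    by_cases hr : r = r' <;> simp [hr, this]

lemma pvGet2_upd2 {M : Nat} {m : List (List Int)} (h : pvShape M m) {r0 c0 : Nat}
    (hr0 : r0 < M) (hc0 : c0 < M) (v : Int) (r c : Nat) :
    pvGet2 (pvUpd2 m r0 c0 v) r c = if r = r0 ∧ c = c0 then v else pvGet2 m r c := by
  obtain ⟨h1, h2⟩ := h
  simp only [pvGet2, pvUpd2, List.getD_eq_getElem?_getD, List.getElem?_modify]
  by_cases hr : r0 = r
  · subst hr
    have hlt : r0 < m.length := by omega
    have hrow := h2 r0 hr0
    rw [List.getD_eq_getElem?_getD] at hrow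
    cases hm : m[r0]? with
    | none => simp only [List.getElem?_eq_none_iff] at hm; omega
    | some row =>
      rw [hm] at hrow; simp at hrow
      simp only [true_and, if_true]
      rw [show ((fun a => a.set c0 v) <$> some row) = some (row.set c0 v) from rfl,
         Option.getD_some, List.getElem?_set]
      by_cases hc : c = c0
      · simp [hc, hrow, hc0]
      · rw [if_neg hc, if_neg (fun h : c0 = c => hc h.symm)]; rfl
  · simp only [if_neg hr]
    have : ¬(r = r0 ∧ c = c0) := fun h => hr h.1.symm
    rw [if_neg this]
    cases hm : m[r]? <;> simp [hr]

lemma pvShape_foldl {β : Type} {M : Nat} (f : List (List Int) → β → List (List Int))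
    (hf : ∀ m x, pvShape M m → pvShape M (f m x)) :
    ∀ (l : List β) (m : List (List Int)), pvShape M m → pvShape M (l.foldl f m) := by
  intro l
  induction l with
  | nil => intro m h; exact h
  | cons x xs ih => intro m h; exact ih _ (hf m x h)

lemma shape_loopB (g : List (List Int)) (N i j a : Nat) (v : Int)
    (m : List (List Int)) (hm : pvShape (N * N) m) (l : List Nat) :
    pvShape (N * N) (l.foldl (fun out b =>
      if pvGet2 g a b = v then pvUpd2 out (i * N + a) (j * N + b) v else out) m) := by
  refine pvShape_foldl _ (fun m' b h => ?_) l m hm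
  split
  · exact pvShape_upd2 h _ _ _
  · exact h

lemma shape_loopA (g : List (List Int)) (N i j : Nat) (v : Int)
    (m : List (List Int)) (hm : pvShape (N * N) m) (l : List Nat) :
    pvShape (N * N) (l.foldl (fun out a =>
      (List.range N).foldl (fun out b =>
        if pvGet2 g a b = v then pvUpd2 out (i * N + a) (j * N + b) v else out) out) m) :=
  pvShape_foldl _ (fun m' a h => shape_loopB g N i j a v m' h _) l m hm

lemma loopB (g : List (List Int)) (N i j a : Nat) (v : Int)
    (hi : i < N) (hj : j < N) (ha : a < N) :
    ∀ (n : Nat), n ≤ N → ∀ (m : List (List Int)), pvShape (N * N) m → ∀ (r c : Nat),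
    pvGet2 ((List.range n).foldl (fun out b =>
        if pvGet2 g a b = v then pvUpd2 out (i * N + a) (j * N + b) v else out) m) r c
      = if r = i * N + a ∧ j * N ≤ c ∧ c < j * N + n ∧ pvGet2 g a (c - j * N) = v
        then v else pvGet2 m r c := by
  intro n
  induction n with
  | zero =>
    intro _ m hm r c
    simp only [List.range_zero, List.foldl_nil]
    rw [if_neg (by rintro ⟨-, h1, h2, -⟩; omega)]
  | succ n ih =>
    intro hn m hm r c
    rw [List.range_succ, List.foldl_append, List.foldl_cons, List.foldl_nil]
    have hnN : n < N := hn
    have hsh := shape_loopB g N i j a v m hm (List.range n)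
    have hIH := ih (Nat.le_of_succ_le hn) m hm r c
    by_cases hg : pvGet2 g a n = v
    · rw [if_pos hg, pvGet2_upd2 hsh (blk_lt hi ha) (blk_lt hj hnN) v r c, hIH]
      by_cases h1 : r = i * N + a ∧ c = j * N + n
      · rw [if_pos h1]
        obtain ⟨hr1, hc1⟩ := h1
        rw [if_pos ⟨hr1, by omega, by omega,
          by rw [show c - j * N = n from by omega]; exact hg⟩]
      · rw [if_neg h1]
        refine if_congr ⟨?_, ?_⟩ rfl rfl
        · rintro ⟨w, x, y, z⟩; exact ⟨w, x, by omega, z⟩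
        · rintro ⟨w, x, y, z⟩
          refine ⟨w, x, ?_, z⟩
          by_contra hlt
          exact h1 ⟨w, by omega⟩
    · rw [if_neg hg, hIH]
      refine if_congr ⟨?_, ?_⟩ rfl rfl
      · rintro ⟨w, x, y, z⟩; exact ⟨w, x, by omega, z⟩
      · rintro ⟨w, x, y, z⟩
        refine ⟨w, x, ?_, z⟩
        by_contra hlt
        rw [show c - j * N = n from by omega] at z
        exact hg z

lemma loopA (g : List (List Int)) (N i j : Nat) (v : Int)
    (hi : i < N) (hj : j < N) :
    ∀ (n : Nat), n ≤ N → ∀ (m : List (List Int)), pvShape (N * N) m → ∀ (r c : Nat),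
    pvGet2 ((List.range n).foldl (fun out a =>
        (List.range N).foldl (fun out b =>
          if pvGet2 g a b = v then pvUpd2 out (i * N + a) (j * N + b) v else out) out) m) r c
      = if i * N ≤ r ∧ r < i * N + n ∧ j * N ≤ c ∧ c < j * N + N ∧
           pvGet2 g (r - i * N) (c - j * N) = v
        then v else pvGet2 m r c := by
  intro n
  induction n with
  | zero =>
    intro _ m hm r c
    simp only [List.range_zero, List.foldl_nil]
    rw [if_neg (by rintro ⟨h1, h2, -⟩; omega)]
  | succ n ih =>
    intro hn m hm r c
    rw [List.range_succ, List.foldl_append, List.foldl_cons, List.foldl_nil]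
    have hnN : n < N := hn
    have hsh := shape_loopA g N i j v m hm (List.range n)
    have hIH := ih (Nat.le_of_succ_le hn) m hm r c
    rw [loopB g N i j n v hi hj hnN N (le_refl N) _ hsh r c, hIH]
    by_cases h1 : r = i * N + n ∧ j * N ≤ c ∧ c < j * N + N ∧ pvGet2 g n (c - j * N) = v
    · rw [if_pos h1]
      obtain ⟨hr1, hc1, hc2, hE⟩ := h1
      rw [if_pos ⟨by omega, by omega, hc1, hc2,
        by rw [show r - i * N = n from by omega]; exact hE⟩]
    · rw [if_neg h1]
      refine if_congr ⟨?_, ?_⟩ rfl rfl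
      · rintro ⟨w, x, y, y2, z⟩; exact ⟨w, by omega, y, y2, z⟩
      · rintro ⟨w, x, y, y2, z⟩
        by_cases hlt : r < i * N + n
        · exact ⟨w, hlt, y, y2, z⟩
        · exfalso
          refine h1 ⟨by omega, y, y2, ?_⟩
          rw [show r - i * N = n from by omega] at z; exact z

lemma shape_loopJ (g : List (List Int)) (N i : Nat)
    (m : List (List Int)) (hm : pvShape (N * N) m) (l : List Nat) :
    pvShape (N * N) (l.foldl (fun out j =>
      (List.range N).foldl (fun out a =>
        (List.range N).foldl (fun out b =>
          if pvGet2 g a b = pvGet2 g i j then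
            pvUpd2 out (i * N + a) (j * N + b) (pvGet2 g i j)
          else out) out) out) m) :=
  pvShape_foldl _ (fun m' j h => shape_loopA g N i j (pvGet2 g i j) m' h _) l m hm

lemma loopJ (g : List (List Int)) (N i : Nat) (hi : i < N) :
    ∀ (n : Nat), n ≤ N → ∀ (m : List (List Int)), pvShape (N * N) m → ∀ (r c : Nat),
    pvGet2 ((List.range n).foldl (fun out j =>
        (List.range N).foldl (fun out a =>
          (List.range N).foldl (fun out b =>
            if pvGet2 g a b = pvGet2 g i j then
              pvUpd2 out (i * N + a) (j * N + b) (pvGet2 g i j)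
            else out) out) out) m) r c
      = if i * N ≤ r ∧ r < i * N + N ∧ c < n * N ∧
           pvGet2 g (r - i * N) (c % N) = pvGet2 g i (c / N)
        then pvGet2 g i (c / N) else pvGet2 m r c := by
  intro n
  induction n with
  | zero =>
    intro _ m hm r c
    simp only [List.range_zero, List.foldl_nil, Nat.zero_mul]
    rw [if_neg (by rintro ⟨-, -, h2, -⟩; omega)]
  | succ n ih =>
    intro hn m hm r c
    rw [List.range_succ, List.foldl_append, List.foldl_cons, List.foldl_nil]
    have hnN : n < N := hn
    have hsh := shape_loopJ g N i m hm (List.range n)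
    have hIH := ih (Nat.le_of_succ_le hn) m hm r c
    rw [loopA g N i n (pvGet2 g i n) hi hnN N (le_refl N) _ hsh r c, hIH]
    have hsm : (n + 1) * N = n * N + N := Nat.succ_mul n N
    by_cases hb : n * N ≤ c ∧ c < n * N + N
    · obtain ⟨d, hd, rfl⟩ : ∃ d, d < N ∧ c = n * N + d := ⟨c - n * N, by omega, by omega⟩
      rw [blk_div hd, blk_mod hd, show n * N + d - n * N = d from by omega]
      by_cases hE : i * N ≤ r ∧ r < i * N + N ∧ pvGet2 g (r - i * N) d = pvGet2 g i n
      · rw [if_pos ⟨hE.1, hE.2.1, by omega, by omega, hE.2.2⟩,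
            if_pos ⟨hE.1, hE.2.1, by omega, hE.2.2⟩]
      · rw [if_neg (by rintro ⟨w, x, -, -, z⟩; exact hE ⟨w, x, z⟩),
            if_neg (by rintro ⟨-, -, y, -⟩; omega),
            if_neg (by rintro ⟨w, x, -, z⟩; exact hE ⟨w, x, z⟩)]
    · rw [if_neg (by rintro ⟨-, -, y1, y2, -⟩; exact hb ⟨y1, y2⟩)]
      refine if_congr ⟨?_, ?_⟩ rfl rfl
      · rintro ⟨w, x, y, z⟩; exact ⟨w, x, by omega, z⟩
      · rintro ⟨w, x, y, z⟩; exact ⟨w, x, by omega, z⟩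

lemma shape_loopI (g : List (List Int)) (N : Nat)
    (m : List (List Int)) (hm : pvShape (N * N) m) (l : List Nat) :
    pvShape (N * N) (l.foldl (fun out i =>
      (List.range N).foldl (fun out j =>
        (List.range N).foldl (fun out a =>
          (List.range N).foldl (fun out b =>
            if pvGet2 g a b = pvGet2 g i j then
              pvUpd2 out (i * N + a) (j * N + b) (pvGet2 g i j)
            else out) out) out) out) m) :=
  pvShape_foldl _ (fun m' i h => shape_loopJ g N i m' h _) l m hm

lemma loopI (g : List (List Int)) (N : Nat) :
    ∀ (n : Nat), n ≤ N → ∀ (m : List (List Int)), pvShape (N * N) m → ∀ (r c : Nat),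
    pvGet2 ((List.range n).foldl (fun out i =>
        (List.range N).foldl (fun out j =>
          (List.range N).foldl (fun out a =>
            (List.range N).foldl (fun out b =>
              if pvGet2 g a b = pvGet2 g i j then
                pvUpd2 out (i * N + a) (j * N + b) (pvGet2 g i j)
              else out) out) out) out) m) r c
      = if r < n * N ∧ c < N * N ∧ pvGet2 g (r % N) (c % N) = pvGet2 g (r / N) (c / N)
        then pvGet2 g (r / N) (c / N) else pvGet2 m r c := by
  intro n
  induction n with
  | zero =>
    intro _ m hm r c
    simp only [List.range_zero, List.foldl_nil, Nat.zero_mul]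
    rw [if_neg (by rintro ⟨h1, -⟩; omega)]
  | succ n ih =>
    intro hn m hm r c
    rw [List.range_succ, List.foldl_append, List.foldl_cons, List.foldl_nil]
    have hnN : n < N := hn
    have hsh := shape_loopI g N m hm (List.range n)
    have hIH := ih (Nat.le_of_succ_le hn) m hm r c
    rw [loopJ g N n hnN N (le_refl N) _ hsh r c, hIH]
    have hsm : (n + 1) * N = n * N + N := Nat.succ_mul n N
    by_cases hb : n * N ≤ r ∧ r < n * N + N
    · obtain ⟨d, hd, rfl⟩ : ∃ d, d < N ∧ r = n * N + d := ⟨r - n * N, by omega, by omega⟩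
      rw [blk_div hd, blk_mod hd, show n * N + d - n * N = d from by omega]
      by_cases hE : c < N * N ∧ pvGet2 g d (c % N) = pvGet2 g n (c / N)
      · rw [if_pos ⟨by omega, by omega, hE.1, hE.2⟩, if_pos ⟨by omega, hE.1, hE.2⟩]
      · rw [if_neg (by rintro ⟨-, -, y, z⟩; exact hE ⟨y, z⟩),
            if_neg (by rintro ⟨y, -⟩; omega),
            if_neg (by rintro ⟨-, y, z⟩; exact hE ⟨y, z⟩)]
    · rw [if_neg (by rintro ⟨y1, y2, -⟩; exact hb ⟨y1, y2⟩)]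
      refine if_congr ⟨?_, ?_⟩ rfl rfl
      · rintro ⟨w, y, z⟩; exact ⟨by omega, y, z⟩
      · rintro ⟨w, y, z⟩; exact ⟨by omega, y, z⟩

lemma getD_of_lt {l : List (List Int)} {r : Nat} (h : r < l.length) : l.getD r [] = l[r] := by
  rw [List.getD_eq_getElem?_getD, List.getElem?_eq_getElem h, Option.getD_some]

lemma getDInt_of_lt {l : List Int} {c : Nat} (h : c < l.length) : l.getD c 0 = l[c] := by
  rw [List.getD_eq_getElem?_getD, List.getElem?_eq_getElem h, Option.getD_some]

lemma getElem_pvGet2 (m : List (List Int)) (r c : Nat) (h1 : r < m.length)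
    (h2 : c < m[r].length) : m[r][c] = pvGet2 m r c := by
  rw [pvGet2, getD_of_lt h1, getDInt_of_lt h2]

lemma shape_zero (M : Nat) :
    pvShape M (List.replicate M (List.replicate M (0 : Int))) :=
  ⟨by simp, fun r hr => by
    simp [List.getD_eq_getElem?_getD, List.getElem?_replicate, hr]⟩

lemma pvGet2_zero (M r c : Nat) :
    pvGet2 (List.replicate M (List.replicate M (0 : Int))) r c = 0 := by
  simp only [pvGet2, List.getD_eq_getElem?_getD, List.getElem?_replicate]
  split_ifs <;> simp [List.getD_eq_getElem?_getD, List.getElem?_replicate] <;> split_ifs <;> simp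

-- ==== B-side machinery ====

-- the (value, position) pairs B's grouping loop inserts, in order
def pvPairs (grid : List (List Int)) : List (Int × (Nat × Nat)) :=
  (List.range grid.length).flatMap (fun i =>
    (List.range grid.length).map (fun j => (pvGet2 grid i j, (i, j))))

def pvGroups (grid : List (List Int)) : PySem.Dict Int (List (Nat × Nat)) :=
  (List.range grid.length).foldl (fun d i =>
    (List.range grid.length).foldl (fun d j =>
      d.modify (pvGet2 grid i j) [] (· ++ [(i, j)])) d) PySem.Dict.empty

lemma pvGroups_flat (grid : List (List Int)) :
    pvGroups grid = (pvPairs grid).foldl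
      (fun d p => d.modify p.1 [] (· ++ [p.2])) PySem.Dict.empty := by
  simp [pvGroups, pvPairs, List.foldl_flatMap, List.foldl_map]

lemma mem_getD_pvGroups (grid : List (List Int)) (v : Int) (q : Nat × Nat) :
    q ∈ (pvGroups grid).getD v []
      ↔ q.1 < grid.length ∧ q.2 < grid.length ∧ pvGet2 grid q.1 q.2 = v := by
  rw [pvGroups_flat, PySem.Dict.getD_foldl_modify_append, PySem.Dict.getD_empty]
  simp only [List.nil_append, List.mem_map, List.mem_filter, pvPairs, List.mem_flatMap,
    List.mem_range, List.mem_map]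
  constructor
  · rintro ⟨p, ⟨⟨i, hi, j, hj, rfl⟩, hv⟩, rfl⟩
    simp only [beq_iff_eq] at hv
    exact ⟨hi, hj, hv⟩
  · rintro ⟨h1, h2, h3⟩
    exact ⟨(v, q), ⟨⟨q.1, h1, q.2, h2, by simp [h3]⟩, by simp⟩, rfl⟩

lemma nodup_keys_pvGroups (grid : List (List Int)) : (pvGroups grid).keys.Nodup := by
  rw [pvGroups_flat]
  exact PySem.Dict.nodup_keys_foldl_modify_key _ _ _ _ _ PySem.Dict.nodup_keys_empty

lemma mem_keys_pvGroups (grid : List (List Int)) (v : Int) :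
    v ∈ (pvGroups grid).keys
      ↔ ∃ i j, i < grid.length ∧ j < grid.length ∧ pvGet2 grid i j = v := by
  rw [pvGroups_flat, PySem.Dict.keys_foldl_modify_key, PySem.Dict.keys_empty,
    PySem.Set.update_nil_left, PySem.Set.mem_ofList]
  simp only [pvPairs, List.mem_map, List.mem_flatMap, List.mem_range, List.mem_map]
  constructor
  · rintro ⟨p, ⟨i, hi, j, hj, rfl⟩, rfl⟩
    exact ⟨i, j, hi, hj, rfl⟩
  · rintro ⟨i, j, hi, hj, rfl⟩
    exact ⟨(pvGet2 grid i j, (i, j)), ⟨i, hi, j, hj, rfl⟩, rfl⟩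

-- the flat list of writes B performs, in order
def pvWrites (grid : List (List Int)) : List (Nat × Nat × Int) :=
  let N := grid.length
  (pvGroups grid).items.flatMap (fun vp =>
    vp.2.flatMap (fun ij =>
      vp.2.map (fun ab => (ij.1 * N + ab.1, ij.2 * N + ab.2, vp.1))))

-- membership in the write list
lemma mem_pvWrites (grid : List (List Int)) (t : Nat × Nat × Int) :
    t ∈ pvWrites grid
      ↔ ∃ i j a b, i < grid.length ∧ j < grid.length ∧ a < grid.length ∧ b < grid.length ∧
          pvGet2 grid a b = pvGet2 grid i j ∧
          t = (i * grid.length + a, j * grid.length + b, pvGet2 grid i j) := by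
  simp only [pvWrites, List.mem_flatMap, List.mem_map]
  constructor
  · rintro ⟨vp, hvp, ij, hij, ab, hab, rfl⟩
    have hvp' : vp ∈ (pvGroups grid).keys.map
        (fun k => (k, (pvGroups grid).getD k [])) := by
      rw [← PySem.Dict.items_eq_map_keys _ (nodup_keys_pvGroups grid) []]
      exact hvp
    obtain ⟨k, hk, rfl⟩ := List.mem_map.mp hvp'
    obtain ⟨hi, hj, hvij⟩ := (mem_getD_pvGroups grid k ij).mp hij
    obtain ⟨ha, hb, hvab⟩ := (mem_getD_pvGroups grid k ab).mp hab
    exact ⟨ij.1, ij.2, ab.1, ab.2, hi, hj, ha, hb, by rw [hvab, hvij], by rw [← hvij]⟩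
  · rintro ⟨i, j, a, b, hi, hj, ha, hb, hv, rfl⟩
    refine ⟨(pvGet2 grid i j, (pvGroups grid).getD (pvGet2 grid i j) []), ?_,
      (i, j), ?_, (a, b), ?_, rfl⟩
    · rw [PySem.Dict.items_eq_map_keys _ (nodup_keys_pvGroups grid) []]
      exact List.mem_map.mpr ⟨pvGet2 grid i j,
        (mem_keys_pvGroups grid _).mpr ⟨i, j, hi, hj, rfl⟩, rfl⟩
    · exact (mem_getD_pvGroups grid _ (i, j)).mpr ⟨hi, hj, rfl⟩
    · exact (mem_getD_pvGroups grid _ (a, b)).mpr ⟨ha, hb, hv⟩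

-- the value of the LAST write touching cell (r, c), if any
def pvLastW (r c : Nat) : List (Nat × Nat × Int) → Option Int
  | [] => none
  | t :: L =>
    match pvLastW r c L with
    | some v => some v
    | none => if t.1 = r ∧ t.2.1 = c then some t.2.2 else none

lemma pvLastW_none_iff (r c : Nat) (L : List (Nat × Nat × Int)) :
    pvLastW r c L = none ↔ ∀ t ∈ L, ¬(t.1 = r ∧ t.2.1 = c) := by
  induction L with
  | nil => simp [pvLastW]
  | cons t L ih =>
    cases hL : pvLastW r c L with
    | some v =>
      simp only [pvLastW, hL, List.mem_cons]
      constructor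
      · intro hc; simp at hc
      · intro hall
        have h2 := ih.mpr (fun t' ht' => hall t' (Or.inr ht'))
        rw [hL] at h2; simp at h2
    | none =>
      have hno := ih.mp hL
      simp only [pvLastW, hL, List.mem_cons]
      constructor
      · intro hnone t' ht'
        rcases ht' with rfl | ht'
        · intro hm; rw [if_pos hm] at hnone; simp at hnone
        · exact hno t' ht'
      · intro hall
        rw [if_neg (hall t (Or.inl rfl))]

lemma pvLastW_some_mem {r c : Nat} {L : List (Nat × Nat × Int)} {v : Int}
    (h : pvLastW r c L = some v) : ∃ t ∈ L, t.1 = r ∧ t.2.1 = c ∧ t.2.2 = v := by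
  induction L with
  | nil => simp [pvLastW] at h
  | cons t L ih =>
    cases hL : pvLastW r c L with
    | some w =>
      rw [pvLastW, hL] at h
      obtain ⟨t', ht', h1⟩ := ih (hL.trans (congrArg some (Option.some.inj h)))
      exact ⟨t', List.mem_cons_of_mem _ ht', h1⟩
    | none =>
      rw [pvLastW, hL] at h
      by_cases hm : t.1 = r ∧ t.2.1 = c
      · rw [if_pos hm] at h
        exact ⟨t, List.mem_cons_self, hm.1, hm.2, Option.some.inj h⟩
      · rw [if_neg hm] at h; simp at h

lemma pvLastW_some_of {r c : Nat} {L : List (Nat × Nat × Int)} {v : Int}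
    (hmem : ∃ t ∈ L, t.1 = r ∧ t.2.1 = c ∧ t.2.2 = v)
    (huniq : ∀ t ∈ L, t.1 = r → t.2.1 = c → t.2.2 = v) :
    pvLastW r c L = some v := by
  induction L with
  | nil => obtain ⟨t, ht, -⟩ := hmem; exact absurd ht (List.not_mem_nil)
  | cons t L ih =>
    cases hL : pvLastW r c L with
    | some w =>
      rw [pvLastW, hL]
      obtain ⟨t', ht', h1, h2, h3⟩ := pvLastW_some_mem hL
      rw [huniq t' (List.mem_cons_of_mem _ ht') h1 h2] at h3
      rw [h3]
    | none =>
      rw [pvLastW, hL]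
      have hnoL := (pvLastW_none_iff r c L).mp hL
      obtain ⟨t', ht', h1, h2, h3⟩ := hmem
      rcases List.mem_cons.mp ht' with rfl | ht'
      · rw [if_pos ⟨h1, h2⟩, h3]
      · exact absurd ⟨h1, h2⟩ (hnoL t' ht')

lemma scatter_shape {M : Nat} (L : List (Nat × Nat × Int)) (m : List (List Int))
    (hm : pvShape M m) :
    pvShape M (L.foldl (fun out t => pvUpd2 out t.1 t.2.1 t.2.2) m) :=
  pvShape_foldl _ (fun m' t h => pvShape_upd2 h _ _ _) L m hm

lemma scatter_get {M : Nat} :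
    ∀ (L : List (Nat × Nat × Int)) (m : List (List Int)), pvShape M m →
    (∀ t ∈ L, t.1 < M ∧ t.2.1 < M) → ∀ (r c : Nat),
    pvGet2 (L.foldl (fun out t => pvUpd2 out t.1 t.2.1 t.2.2) m) r c
      = (pvLastW r c L).getD (pvGet2 m r c) := by
  intro L
  induction L with
  | nil => intro m hm _ r c; simp [pvLastW]
  | cons t L ih =>
    intro m hm hrange r c
    rw [List.foldl_cons]
    have ht := hrange t List.mem_cons_self
    have hm' := pvShape_upd2 hm t.1 t.2.1 t.2.2
    rw [ih _ hm' (fun t' ht' => hrange t' (List.mem_cons_of_mem _ ht')) r c,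
      pvGet2_upd2 hm ht.1 ht.2 t.2.2 r c]
    rw [pvLastW]
    cases hL : pvLastW r c L with
    | some v => rfl
    | none =>
      by_cases hmt : t.1 = r ∧ t.2.1 = c
      · rw [if_pos hmt, if_pos ⟨hmt.1.symm, hmt.2.symm⟩]; rfl
      · rw [if_neg hmt, if_neg (fun h => hmt ⟨h.1.symm, h.2.symm⟩)]

lemma writes_range (grid : List (List Int)) :
    ∀ t ∈ pvWrites grid, t.1 < grid.length * grid.length ∧
      t.2.1 < grid.length * grid.length := by
  intro t ht
  obtain ⟨i, j, a, b, hi, hj, ha, hb, -, rfl⟩ := (mem_pvWrites grid t).mp ht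
  exact ⟨blk_lt hi ha, blk_lt hj hb⟩

lemma pvLastW_writes (grid : List (List Int)) (r c : Nat)
    (hr : r < grid.length * grid.length) (hc : c < grid.length * grid.length) :
    pvLastW r c (pvWrites grid)
      = if pvGet2 grid (r % grid.length) (c % grid.length)
           = pvGet2 grid (r / grid.length) (c / grid.length)
        then some (pvGet2 grid (r / grid.length) (c / grid.length)) else none := by
  have hN : 0 < grid.length := by by_contra h; simp [Nat.eq_zero_of_not_pos h] at hr
  have hrd : r / grid.length < grid.length := Nat.div_lt_iff_lt_mul hN |>.mpr hr
  have hcd : c / grid.length < grid.length := Nat.div_lt_iff_lt_mul hN |>.mpr hc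
  have hrm : r % grid.length < grid.length := Nat.mod_lt _ hN
  have hcm : c % grid.length < grid.length := Nat.mod_lt _ hN
  have hre : r / grid.length * grid.length + r % grid.length = r := by
    rw [Nat.mul_comm]; exact Nat.div_add_mod r grid.length
  have hce : c / grid.length * grid.length + c % grid.length = c := by
    rw [Nat.mul_comm]; exact Nat.div_add_mod c grid.length
  -- every write to (r, c) carries the value grid[r//N][c//N]
  have huniq : ∀ t ∈ pvWrites grid, t.1 = r → t.2.1 = c →
      t.2.2 = pvGet2 grid (r / grid.length) (c / grid.length) := by
    intro t ht h1 h2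
    obtain ⟨i, j, a, b, hi, hj, ha, hb, hv, rfl⟩ := (mem_pvWrites grid t).mp ht
    simp only at h1 h2 ⊢
    subst h1; subst h2
    rw [blk_div ha, blk_div hb]
  by_cases hcond : pvGet2 grid (r % grid.length) (c % grid.length)
      = pvGet2 grid (r / grid.length) (c / grid.length)
  · rw [if_pos hcond]
    refine pvLastW_some_of ⟨(r, c, pvGet2 grid (r / grid.length) (c / grid.length)),
      ?_, rfl, rfl, rfl⟩ huniq
    rw [mem_pvWrites]
    exact ⟨r / grid.length, c / grid.length, r % grid.length, c % grid.length,
      hrd, hcd, hrm, hcm, hcond, by rw [hre, hce]⟩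
  · rw [if_neg hcond, pvLastW_none_iff]
    rintro t ht ⟨h1, h2⟩
    obtain ⟨i, j, a, b, hi, hj, ha, hb, hv, rfl⟩ := (mem_pvWrites grid t).mp ht
    simp only at h1 h2
    have hia : i = r / grid.length := by rw [← h1, blk_div ha]
    have haa : a = r % grid.length := by rw [← h1, blk_mod ha]
    have hjb : j = c / grid.length := by rw [← h2, blk_div hb]
    have hbb : b = c % grid.length := by rw [← h2, blk_mod hb]
    rw [hia, haa, hjb, hbb] at hv
    exact hcond hv

-- B's nested scatter loop is the fold of the flat write list
lemma alt_flat (grid : List (List Int)) :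
    transform_alt grid
      = (pvWrites grid).foldl (fun out t => pvUpd2 out t.1 t.2.1 t.2.2)
          (List.replicate (grid.length * grid.length)
            (List.replicate (grid.length * grid.length) (0 : Int))) := by
  simp only [transform_alt, pvWrites, pvGroups, List.foldl_flatMap, List.foldl_map]

-- ===== VERDICT (by name: the statement is the Claim_ definition above) =====
theorem transform_spec : Claim_equal_transform := by
  intro grid _ _
  show transform grid = transform_alt grid
  have hM : pvShape (grid.length * grid.length)
      (List.replicate (grid.length * grid.length)
        (List.replicate (grid.length * grid.length) (0 : Int))) :=
    shape_zero (grid.length * grid.length)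
  have hshA := shape_loopI grid grid.length _ hM (List.range grid.length)
  have hshB := scatter_shape (pvWrites grid) _ hM
  rw [alt_flat]
  simp only [transform]
  apply List.ext_getElem
  · rw [hshA.1, hshB.1]
  · intro r h1 h2
    have hN2 : r < grid.length * grid.length := by rw [hshA.1] at h1; exact h1
    apply List.ext_getElem
    · rw [← getD_of_lt h1, ← getD_of_lt h2, hshA.2 r hN2, hshB.2 r hN2]
    · intro c hc1 hc2
      have hc : c < grid.length * grid.length := by
        rw [← getD_of_lt h1, hshA.2 r hN2] at hc1; exact hc1
      rw [getElem_pvGet2 _ r c h1 hc1, getElem_pvGet2 _ r c h2 hc2,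
        loopI grid grid.length grid.length (le_refl _) _ hM r c,
        scatter_get (pvWrites grid) _ hM (writes_range grid) r c,
        pvLastW_writes grid r c hN2 hc, pvGet2_zero]
      by_cases hE : pvGet2 grid (r % grid.length) (c % grid.length)
          = pvGet2 grid (r / grid.length) (c / grid.length)
      · rw [if_pos ⟨hN2, hc, hE⟩, if_pos hE]; rfl
      · rw [if_neg (by rintro ⟨-, -, z⟩; exact hE z), if_neg hE]; rfl
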